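-- pv_equiv track=rewrite | github.com/arek-grows/Challenges | Challenges 121-140/Challenge122.py | steps_to_convert
-- ===== SOURCE A (Python) =====
-- def steps_to_convert(text: str) -> int:
--     steps = [0, 0]  # in the end, index 0 is how many steps for lower, index 1 for upper
--     for t in text:
--         if t.isupper():
--             steps[0] += 1
--         else:
--             steps[1] += 1
--     return min(steps)  # Put your code here!!!
-- ===== SOURCE B (Python) =====
-- def steps_to_convert(text: str) -> int:
--     def uppers(s: str) -> int:
--         if len(s) <= 1:
--             return 1 if s and s.isupper() else 0
--         m = len(s) // 2
--         return uppers(s[:m]) + uppers(s[m:])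
--     u = uppers(text)
--     return min(u, len(text) - u)
-- ===== Notes on version B (the rewrite author's own statement) =====
-- stated objective: alternative
-- what changed: B counts uppercase characters by divide-and-conquer recursion on string halves and derives the non-upper bucket arithmetically as len(text)-u, instead of A's single linear loop maintaining two parallel counters in a list.
import Mathlib
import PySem

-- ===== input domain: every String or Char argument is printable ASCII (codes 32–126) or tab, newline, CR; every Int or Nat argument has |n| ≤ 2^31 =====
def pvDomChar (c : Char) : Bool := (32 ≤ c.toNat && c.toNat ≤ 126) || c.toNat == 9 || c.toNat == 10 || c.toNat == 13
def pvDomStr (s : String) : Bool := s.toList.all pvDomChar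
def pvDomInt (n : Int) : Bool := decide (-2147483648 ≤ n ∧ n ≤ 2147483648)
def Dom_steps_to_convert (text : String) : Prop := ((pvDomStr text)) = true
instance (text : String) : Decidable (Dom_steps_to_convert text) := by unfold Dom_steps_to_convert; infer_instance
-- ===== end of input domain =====

-- B counts uppercase by divide-and-conquer recursion on string halves and derives the non-upper bucket as len-u (objective: alternative).

-- ===== PORT A =====
def steps_to_convert (text : String) : Int :=
  let steps : Int × Int :=
    text.toList.foldl
      (fun s t => if PySem.Chars.isupper t then (s.1 + 1, s.2) else (s.1, s.2 + 1))
      (0, 0)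
  min steps.1 steps.2

-- ===== PORT B =====
-- helper `uppers` from Source B: divide-and-conquer count of the uppercase characters
def uppersDC (l : List Char) : Int :=
  if _h : l.length ≤ 1 then
    -- `1 if s and s.isupper() else 0` on a string of length ≤ 1
    match l with
    | [] => 0
    | c :: _ => if PySem.Chars.isupper c then 1 else 0
  else
    uppersDC (l.take (l.length / 2)) + uppersDC (l.drop (l.length / 2))
termination_by l.length
decreasing_by
  · simp only [List.length_take]; omega
  · simp only [List.length_drop]; omega

def steps_to_convert_alt (text : String) : Int :=
  let u : Int := uppersDC text.toList
  min u ((text.toList.length : Int) - u)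

-- ===== PRECONDITION & SPEC =====
def Spec_steps_to_convert (text : String) (out : Int) : Prop := out = steps_to_convert_alt text
instance (text : String) (out : Int) : Decidable (Spec_steps_to_convert text out) := by unfold Spec_steps_to_convert; infer_instance

-- ===== CLAIM (what is proved, stated in full; the proofs are below) =====
def Claim_equal_steps_to_convert : Prop := ∀ (text : String), Dom_steps_to_convert text → Spec_steps_to_convert text (steps_to_convert text)

-- ===== LEMMAS AND PROOFS =====

theorem uppersDC_eq (l : List Char) :
    uppersDC l = ((l.countP (fun c => PySem.Chars.isupper c) : Nat) : Int) := by
  generalize hn : l.length = n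
  induction n using Nat.strong_induction_on generalizing l with
  | _ n ih =>
    rw [uppersDC]
    by_cases h : l.length ≤ 1
    · simp only [h, dite_true]
      match l with
      | [] => simp
      | [c] => simp [List.countP_cons]
      | a :: b :: t => simp at h
    · simp only [h, dite_false]
      rw [ih (l.take (l.length / 2)).length (by simp only [List.length_take]; omega) _ rfl,
          ih (l.drop (l.length / 2)).length (by simp only [List.length_drop]; omega) _ rfl]
      conv_rhs => rw [← List.take_append_drop (l.length / 2) l]
      rw [List.countP_append]
      push_cast
      ring

theorem steps_foldl_eq (l : List Char) (a b : Int) :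
    l.foldl (fun (s : Int × Int) t => if PySem.Chars.isupper t then (s.1 + 1, s.2) else (s.1, s.2 + 1)) (a, b)
      = (a + (l.countP (fun c => PySem.Chars.isupper c) : Nat),
         b + ((l.length : Int) - (l.countP (fun c => PySem.Chars.isupper c) : Nat))) := by
  induction l generalizing a b with
  | nil => simp
  | cons c cs ih =>
    simp only [List.foldl_cons, List.countP_cons, List.length_cons]
    by_cases h : PySem.Chars.isupper c
    · simp only [h, if_true, ih, Prod.mk.injEq]
      refine ⟨by push_cast; ring, by push_cast; ring⟩
    · simp only [h, ih, Bool.false_eq_true, if_false, Prod.mk.injEq]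
      refine ⟨by push_cast; ring, by push_cast; ring⟩

-- ===== VERDICT (by name: the statement is the Claim_ definition above) =====
theorem steps_to_convert_spec : Claim_equal_steps_to_convert := by
  intro text _
  unfold Spec_steps_to_convert steps_to_convert steps_to_convert_alt
  simp only [steps_foldl_eq, uppersDC_eq, zero_add]
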